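-- pv_equiv track=rewrite | github.com/tbastis/MusicGeneration | musicgen/scripts/bar_extractor.py | tokens_to_bars
-- ===== SOURCE A (Python) =====
-- def tokens_to_bars(tokens):
--     """Splits a list of tokens into a 2d list of individual bars"""
--     bars = []
--     i1 = 0
--     for i2 in range(1, len(tokens)):
--         if (tokens[i2] == 1 or i2 == len(tokens) - 1):  # New bar or end of last
--             bar = []
--             for i in range(i1, i2):
--                 bar.append(tokens[i])
--             if i2 == len(tokens) - 1:
--                 bar.append(tokens[-1])
--             else:
--                 i1 = i2
--             bars.append(bar)
--     return bars
-- ===== SOURCE B (Python) =====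
-- def tokens_to_bars(tokens):
--     """Splits a list of tokens into a 2d list of individual bars"""
--     n = len(tokens)
--     if n <= 1:
--         return []
--     bounds = [0] + [i for i in range(1, n - 1) if tokens[i] == 1] + [n]
--     return [list(tokens[a:b]) for a, b in zip(bounds, bounds[1:])]
-- ===== Notes on version B (the rewrite author's own statement) =====
-- stated objective: alternative
-- what changed: Replaces A's nested append loops with state (bars, i1) by a two-phase plan: one pass collects boundary indices (0, every interior index with token 1, len), then each bar is a slice between consecutive boundaries.
import Mathlib
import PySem

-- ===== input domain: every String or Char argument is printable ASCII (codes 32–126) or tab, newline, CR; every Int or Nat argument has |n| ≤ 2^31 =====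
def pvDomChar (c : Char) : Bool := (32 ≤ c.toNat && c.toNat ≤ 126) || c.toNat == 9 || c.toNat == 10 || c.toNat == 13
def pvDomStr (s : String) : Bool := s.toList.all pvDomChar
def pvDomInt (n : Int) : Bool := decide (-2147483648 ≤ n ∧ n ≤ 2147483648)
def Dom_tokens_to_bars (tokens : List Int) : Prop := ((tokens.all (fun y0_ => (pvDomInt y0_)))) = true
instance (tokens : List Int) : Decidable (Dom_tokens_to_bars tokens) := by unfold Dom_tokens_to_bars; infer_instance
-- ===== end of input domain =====

-- B replaces A's nested append loops and running split state by a boundary-index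
-- table followed by slicing between consecutive boundaries (objective: alternative).

-- ===== PORT A =====
-- The body of A's loop over i2 (carrying the state (bars, i1)); the inner
-- bar-building loop is a fold over range(i1, i2) appending tokens[i].
def pvStep (tokens : List Int) (n : Int) (st : List (List Int) × Int) (i2 : Int) : List (List Int) × Int :=
  if PySem.List.pyGetD tokens i2 0 == 1 || i2 == n - 1 then
    let bar := (PySem.List.pyRange st.2 i2 1).foldl
      (fun b i => b ++ [PySem.List.pyGetD tokens i 0]) []
    if i2 == n - 1 then (st.1 ++ [bar ++ [PySem.List.pyGetD tokens (-1) 0]], st.2)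
    else (st.1 ++ [bar], i2)
  else st

def tokens_to_bars (tokens : List Int) : List (List Int) :=
  ((PySem.List.pyRange 1 (tokens.length : Int) 1).foldl
    (pvStep tokens (tokens.length : Int)) (([] : List (List Int)), (0 : Int))).1

-- ===== PORT B =====
-- [list(tokens[a:b]) for a, b in zip(bounds, bounds[1:])]
def pvSliceBars (tokens : List Int) (bounds : List Int) : List (List Int) :=
  (bounds.zip bounds.tail).map (fun p => PySem.List.slice tokens (some p.1) (some p.2))

def tokens_to_bars_alt (tokens : List Int) : List (List Int) :=
  let n : Int := tokens.length
  if n ≤ 1 then []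
  else
    let bounds : List Int :=
      0 :: ((PySem.List.pyRange 1 (n - 1) 1).filter
              (fun i => PySem.List.pyGetD tokens i 0 == 1) ++ [n])
    pvSliceBars tokens bounds

-- ===== PRECONDITION & SPEC =====
def Spec_tokens_to_bars (tokens : List Int) (out : List (List Int)) : Prop := out = tokens_to_bars_alt tokens
instance (tokens : List Int) (out : List (List Int)) : Decidable (Spec_tokens_to_bars tokens out) := by unfold Spec_tokens_to_bars; infer_instance

-- ===== CLAIM (what is proved, stated in full; the proofs are below) =====
def Claim_equal_tokens_to_bars : Prop := ∀ (tokens : List Int), Dom_tokens_to_bars tokens → Spec_tokens_to_bars tokens (tokens_to_bars tokens)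

-- ===== LEMMAS AND PROOFS =====

-- A's inner bar-building loop over range(i1, i2) builds exactly the slice tokens[i1:i2].
lemma bar_fold_eq_slice (tokens : List Int) (a b : Int) (h0 : 0 ≤ a) (hab : a ≤ b)
    (hb : b ≤ (tokens.length : Int)) :
    (PySem.List.pyRange a b 1).foldl (fun bl i => bl ++ [PySem.List.pyGetD tokens i 0]) []
      = PySem.List.slice tokens (some a) (some b) := by
  rw [PySem.List.foldl_append_singleton_eq_map]
  rw [PySem.List.slice_toNat tokens h0 (le_trans h0 hab)]
  simp only [List.nil_append]
  rw [PySem.List.pyRange_one]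
  apply List.ext_getElem
  · simp
    omega
  · intro i h1 h2
    simp only [List.getElem_map, List.getElem_range, List.getElem_take, List.getElem_drop]
    rw [PySem.List.pyGetD_eq_getElem]
    · congr 1
      simp at h1
      omega
    · omega
    · simp at h1 ⊢
      omega

-- Appending tokens[-1] to the slice ending at len-1 closes the final bar: tokens[i1:len].
lemma close_last (tokens : List Int) (i1 : Int) (h0 : 0 ≤ i1)
    (h1 : i1 ≤ (tokens.length : Int) - 1) :
    PySem.List.slice tokens (some i1) (some ((tokens.length : Int) - 1))
        ++ [PySem.List.pyGetD tokens (-1) 0]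
      = PySem.List.slice tokens (some i1) (some (tokens.length : Int)) := by
  have hne : tokens ≠ [] := by
    intro h; subst h; simp at h1; omega
  rw [PySem.List.pyGetD_neg_one tokens 0 hne]
  rw [PySem.List.slice_toNat tokens h0 (by omega : (0:Int) ≤ (tokens.length:Int) - 1), PySem.List.slice_toNat tokens h0 (by omega : (0:Int) ≤ (tokens.length:Int))]
  have hlen : (tokens.drop i1.toNat).length = tokens.length - i1.toNat := by simp
  have hd : tokens.drop i1.toNat ≠ [] := by
    intro h
    have := congrArg List.length h
    simp at this
    omega
  have hlast : (tokens.drop i1.toNat).getLast hd = tokens.getLast hne := by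
    rw [List.getLast_drop]
  rw [← hlast]
  have ht1 : ((tokens.length : Int) - 1).toNat - i1.toNat = (tokens.drop i1.toNat).length - 1 := by
    omega
  have ht2 : ((tokens.length : Int)).toNat - i1.toNat = (tokens.drop i1.toNat).length := by
    omega
  rw [ht1, ht2, List.take_length, ← List.dropLast_eq_take, List.dropLast_append_getLast hd]

-- Loop invariant: from index a with open bar starting at i1, A's remaining fold
-- appends exactly the slices between consecutive boundaries i1, {i ∈ [a, n-1) | tokens[i] = 1}, n.
lemma main_loop (tokens : List Int) : ∀ (m : Nat) (a i1 : Int) (bars : List (List Int)),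
    0 ≤ i1 → i1 ≤ a → 1 ≤ a → a + m = (tokens.length : Int) - 1 →
    ((PySem.List.pyRange a (tokens.length : Int) 1).foldl
        (pvStep tokens (tokens.length : Int)) (bars, i1)).1
      = bars ++ pvSliceBars tokens
          (i1 :: ((PySem.List.pyRange a ((tokens.length : Int) - 1) 1).filter
                    (fun i => PySem.List.pyGetD tokens i 0 == 1) ++ [(tokens.length : Int)])) := by
  intro m
  induction m with
  | zero =>
    intro a i1 bars h0 h1 ha heq
    rw [PySem.List.pyRange_one_cons (by omega : a < (tokens.length : Int))]
    rw [PySem.List.pyRange_one_eq_nil (by omega : (tokens.length : Int) ≤ a + 1)]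
    rw [PySem.List.pyRange_one_eq_nil (by omega : (tokens.length : Int) - 1 ≤ a)]
    simp only [List.foldl_cons, List.foldl_nil, List.filter_nil, List.nil_append]
    unfold pvStep
    have hend : (a == (tokens.length : Int) - 1) = true := by simp; omega
    simp only [hend, Bool.or_true, if_true]
    simp only [bar_fold_eq_slice tokens i1 a h0 h1 (by omega)]
    have : a = (tokens.length : Int) - 1 := by omega
    subst this
    rw [close_last tokens i1 h0 h1]
    simp [pvSliceBars]
  | succ m ih =>
    intro a i1 bars h0 h1 ha heq
    rw [PySem.List.pyRange_one_cons (by omega : a < (tokens.length : Int))]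
    rw [PySem.List.pyRange_one_cons (by omega : a < (tokens.length : Int) - 1)]
    simp only [List.foldl_cons, List.filter_cons]
    have hend : (a == (tokens.length : Int) - 1) = false := by simp; omega
    by_cases hP : (PySem.List.pyGetD tokens a 0 == 1) = true
    · have hstep : pvStep tokens (tokens.length : Int) (bars, i1) a
          = (bars ++ [PySem.List.slice tokens (some i1) (some a)], a) := by
        unfold pvStep
        simp only [hP, hend, Bool.true_or, if_true, Bool.false_eq_true, if_false]
        simp only [bar_fold_eq_slice tokens i1 a h0 h1 (by omega)]
      rw [hstep, ih (a+1) a _ (by omega) (by omega) (by omega) (by omega)]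
      simp only [hP, if_true]
      rw [List.append_assoc]
      rfl
    · have hP' : (PySem.List.pyGetD tokens a 0 == 1) = false := by
        simpa using hP
      have hstep : pvStep tokens (tokens.length : Int) (bars, i1) a = (bars, i1) := by
        unfold pvStep
        simp [hP', hend]
      rw [hstep, ih (a+1) i1 _ (by omega) (by omega) (by omega) (by omega)]
      simp [hP']

-- ===== VERDICT (by name: the statement is the Claim_ definition above) =====
theorem tokens_to_bars_spec : Claim_equal_tokens_to_bars := by
  intro tokens _
  unfold Spec_tokens_to_bars tokens_to_bars tokens_to_bars_alt
  by_cases hn : (tokens.length : Int) ≤ 1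
  · rw [PySem.List.pyRange_one_eq_nil hn]
    simp [hn]
  · rw [main_loop tokens ((tokens.length : Int) - 2).toNat 1 0 [] le_rfl (by omega) le_rfl (by omega)]
    simp [hn]
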